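-- pv_equiv track=rewrite | github.com/RodrigoG13/TeoriaComputacion | protocolo/p2.py | automata_paridad
-- ===== SOURCE A (Python) =====
-- def automata_paridad(palabra: str) -> int:
--     """Función que pasa una palabra por el autómata de paridad y devuelve el estado en que se
--         quedó
--
--     Args:
--         palabra (str): Palabra que se testeará
--
--     Returns:
--         int: Estado en el que se quedó el autómata
--     """
--
--     estado = 0
--     for caracter in palabra:
--         match estado:
--             case 0:
--                 if caracter == "0":
--                     estado = 1
--                 else:
--                     estado = 3
--
--             case 1:
--                 if caracter == "0":
--                     estado = 0
--                 else:
--                     estado = 2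
--
--             case 2:
--                 if caracter == "0":
--                     estado = 3
--                 else:
--                     estado = 1
--
--             case 3:
--                 if caracter == "0":
--                     estado = 2
--                 else:
--                     estado = 0
--         continue
--     return estado
-- ===== SOURCE B (Python) =====
-- def automata_paridad(palabra: str) -> int:
--     """Closed form: the 4 states encode (parity of '0's, parity of other chars)."""
--     z = sum(1 for c in palabra if c == "0")
--     parz = z % 2
--     paro = (len(palabra) - z) % 2
--     return 2 * paro + (parz + paro) % 2
-- ===== Notes on version B (the rewrite author's own statement) =====
-- stated objective: simpler
-- what changed: Replaces the per-character 4-state automaton loop with a closed form: count the zero characters, take the two parities (zeros, non-zeros) and map them arithmetically to the final state.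
import Mathlib
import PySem

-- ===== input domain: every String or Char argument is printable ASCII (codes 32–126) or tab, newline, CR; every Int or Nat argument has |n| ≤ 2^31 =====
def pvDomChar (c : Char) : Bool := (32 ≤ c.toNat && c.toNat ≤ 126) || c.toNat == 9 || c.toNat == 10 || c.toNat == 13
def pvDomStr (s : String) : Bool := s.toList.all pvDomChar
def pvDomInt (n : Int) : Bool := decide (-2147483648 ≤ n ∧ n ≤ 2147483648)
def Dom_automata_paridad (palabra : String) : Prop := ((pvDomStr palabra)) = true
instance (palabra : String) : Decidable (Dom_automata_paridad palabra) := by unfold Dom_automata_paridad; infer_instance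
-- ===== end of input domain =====

-- B replaces A's per-character 4-state loop by a closed form over the two character-class parities (objective: simpler).


-- ===== PORT A =====
-- step-for-step transliteration of A's match/if transition table
def pvStepA (estado : Int) (caracter : Char) : Int :=
  if estado = 0 then (if caracter = '0' then 1 else 3)
  else if estado = 1 then (if caracter = '0' then 0 else 2)
  else if estado = 2 then (if caracter = '0' then 3 else 1)
  else if estado = 3 then (if caracter = '0' then 2 else 0)
  else estado

def automata_paridad (palabra : String) : Int :=
  palabra.toList.foldl pvStepA 0

-- ===== PORT B =====
def automata_paridad_alt (palabra : String) : Int :=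
  let z : Int := ((palabra.toList.filter (fun c => c = '0')).length : Int)
  let parz : Int := z % 2
  let paro : Int := ((palabra.toList.length : Int) - z) % 2
  2 * paro + (parz + paro) % 2

-- ===== PRECONDITION & SPEC =====
def Spec_automata_paridad (palabra : String) (out : Int) : Prop := out = automata_paridad_alt palabra
instance (palabra : String) (out : Int) : Decidable (Spec_automata_paridad palabra out) := by unfold Spec_automata_paridad; infer_instance

-- ===== CLAIM (what is proved, stated in full; the proofs are below) =====
def Claim_equal_automata_paridad : Prop := ∀ (palabra : String), Dom_automata_paridad palabra → Spec_automata_paridad palabra (automata_paridad palabra)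

-- ===== LEMMAS AND PROOFS =====

-- state encoding by the two parities: p = parity of '0's seen, q = parity of other chars seen
def pvEnc (p q : Bool) : Int := 2 * (cond q 1 0) + (cond (xor p q) 1 0)

theorem pvStepA_enc (p q : Bool) (c : Char) :
    pvStepA (pvEnc p q) c = if c = '0' then pvEnc (!p) q else pvEnc p (!q) := by
  cases p <;> cases q <;> by_cases h : c = '0' <;> simp [pvEnc, pvStepA, h]

theorem pvFlip (x : Nat) : decide ((x + 1) % 2 = 1) = !decide (x % 2 = 1) := by
  rcases Nat.mod_two_eq_zero_or_one x with h | h <;> simp [Nat.add_mod, h]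

theorem pvXorNot (p b : Bool) : xor p (!b) = xor (!p) b := by
  cases p <;> cases b <;> rfl

theorem pvFoldA_enc (l : List Char) (p q : Bool) :
    l.foldl pvStepA (pvEnc p q) =
      pvEnc (xor p (decide ((l.countP (fun c => c = '0')) % 2 = 1)))
            (xor q (decide ((l.length - l.countP (fun c => c = '0')) % 2 = 1))) := by
  induction l generalizing p q with
  | nil => simp
  | cons c t ih =>
    have hle : t.countP (fun c => c = '0') ≤ t.length := List.countP_le_length
    rw [List.foldl_cons, pvStepA_enc]
    by_cases h : c = '0'
    · rw [if_pos h, ih]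
      have hc : (c :: t).countP (fun c => c = '0') = t.countP (fun c => c = '0') + 1 := by
        simp [h]
      rw [hc]
      have hl : (c :: t).length - (t.countP (fun c => c = '0') + 1)
          = t.length - t.countP (fun c => c = '0') := by
        simp only [List.length_cons]; omega
      rw [hl, pvFlip, pvXorNot]
    · rw [if_neg h, ih]
      have hc : (c :: t).countP (fun c => c = '0') = t.countP (fun c => c = '0') := by
        simp [h]
      rw [hc]
      have hl : (c :: t).length - t.countP (fun c => c = '0')
          = (t.length - t.countP (fun c => c = '0')) + 1 := by
        simp only [List.length_cons]; omega
      rw [hl, pvFlip, pvXorNot]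

theorem pvAlt_enc (palabra : String) :
    automata_paridad_alt palabra =
      pvEnc (decide ((palabra.toList.countP (fun c => c = '0')) % 2 = 1))
            (decide ((palabra.toList.length - palabra.toList.countP (fun c => c = '0')) % 2 = 1)) := by
  unfold automata_paridad_alt
  have hcount : (palabra.toList.filter (fun c => c = '0')).length
      = palabra.toList.countP (fun c => c = '0') := List.countP_eq_length_filter.symm
  rw [hcount]
  set n := palabra.toList.length with hn
  set k := palabra.toList.countP (fun c => c = '0') with hk
  have hle : k ≤ n := List.countP_le_length
  rcases Nat.mod_two_eq_zero_or_one k with h1 | h1 <;>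
    rcases Nat.mod_two_eq_zero_or_one (n - k) with h2 | h2 <;>
  · have hz : (k : Int) % 2 = (k % 2 : Nat) := by omega
    have ho : ((n : Int) - (k : Int)) % 2 = ((n - k : Nat) : Int) % 2 := by omega
    have ho2 : ((n - k : Nat) : Int) % 2 = ((n - k) % 2 : Nat) := by omega
    simp only [hz, ho, ho2, h1, h2, pvEnc]
    norm_num

-- ===== VERDICT (by name: the statement is the Claim_ definition above) =====
theorem automata_paridad_spec : Claim_equal_automata_paridad := by
  intro palabra _
  unfold Spec_automata_paridad
  rw [pvAlt_enc]
  have h0 : (0 : Int) = pvEnc false false := by simp [pvEnc]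
  unfold automata_paridad
  rw [h0, pvFoldA_enc]
  simp
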